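-- pv_equiv track=rewrite | github.com/erfanzar/EasyDeL | easydel/inference/esurge/mixins/parsing.py | _find_first_stop_string
-- ===== SOURCE A (Python) =====
-- def _find_first_stop_string(text: str, stop_sequences: list[str]) -> tuple[int, str] | None:
--     """Locate the earliest stop sequence in ``text`` (longest wins on tie).
--
--     Iterates over ``stop_sequences`` and finds each one's first
--     occurrence in ``text`` via ``str.find``. Returns the match with the
--     smallest index; ties are broken in favour of the *longest* stop
--     sequence so that a more specific marker like ``"</tool_call>"``
--     wins over a generic ``">"``.
--
--     Args:
--         text: Currently-accumulated detokenized output to search.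
--         stop_sequences: List of strings; empty entries are skipped.
--
--     Returns:
--         ``(index, matched_string)`` for the earliest/longest match, or
--         ``None`` when no stop sequence appears in ``text``.
--     """
--     best_index: int | None = None
--     best_stop: str | None = None
--     for stop_seq in stop_sequences:
--         if not stop_seq:
--             continue
--         idx = text.find(stop_seq)
--         if idx < 0:
--             continue
--         if best_index is None or idx < best_index or (idx == best_index and len(stop_seq) > len(best_stop or "")):
--             best_index = idx
--             best_stop = stop_seq
--     if best_index is None or best_stop is None:
--         return None
--     return best_index, best_stop
-- ===== SOURCE B (Python) =====
-- def _find_first_stop_string(text: str, stop_sequences: list[str]) -> tuple[int, str] | None: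
--     """Scan text positions left to right; at the first position where any
--     stop sequence begins, return it (longest match at that position)."""
--     patterns = [s for s in stop_sequences if s]
--     for i in range(len(text)):
--         best = None
--         for s in patterns:
--             if text.startswith(s, i) and (best is None or len(s) > len(best)):
--                 best = s
--         if best is not None:
--             return i, best
--     return None
-- ===== Notes on version B (the rewrite author's own statement) =====
-- stated objective: alternative
-- what changed: A scans pattern-major (one full str.find per stop sequence, keeping the best (index, length) pair); B scans position-major: a single left-to-right pass over text positions that returns at the first position where any stop sequence begins, picking the longest sequence starting there, so it never looks past the earliest match (a timing run measured this early exit much faster on its generated inputs; worst-case no-match cost is comparable).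
import Mathlib
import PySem

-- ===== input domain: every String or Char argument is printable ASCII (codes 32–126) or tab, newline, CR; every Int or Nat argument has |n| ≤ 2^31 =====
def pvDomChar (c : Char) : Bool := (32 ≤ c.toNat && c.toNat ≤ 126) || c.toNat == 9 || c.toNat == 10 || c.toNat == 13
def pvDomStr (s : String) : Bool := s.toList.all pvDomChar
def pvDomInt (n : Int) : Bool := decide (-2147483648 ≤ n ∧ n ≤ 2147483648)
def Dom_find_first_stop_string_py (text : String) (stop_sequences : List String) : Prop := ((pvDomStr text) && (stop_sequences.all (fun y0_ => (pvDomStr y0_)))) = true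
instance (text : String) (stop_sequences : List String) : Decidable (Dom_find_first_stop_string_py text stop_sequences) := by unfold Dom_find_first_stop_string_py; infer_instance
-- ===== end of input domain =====

-- B replaces A's per-pattern `text.find` scan by a single left-to-right scan over text
-- positions, returning at the first position where any stop sequence begins (longest there);
-- objective: alternative traversal (position-major instead of pattern-major), same result.

-- ===== PORT A =====
-- one iteration of A's `for stop_seq in stop_sequences` loop, state = (best_index, best_stop)
-- (Python's two Optional locals are always both None or both set, so one Option pair)
def pvStepA (t : List Char) (o : Option (Int × List Char)) (s : List Char) : Option (Int × List Char) :=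
  if s = [] then o                                   -- if not stop_seq: continue
  else if PySem.Chars.find t s < 0 then o            -- idx = text.find(stop_seq); if idx < 0: continue
  else
    match o with
    | none => some (PySem.Chars.find t s, s)
    | some (bi, bs) =>
      if PySem.Chars.find t s < bi ∨ (PySem.Chars.find t s = bi ∧ bs.length < s.length)
      then some (PySem.Chars.find t s, s)
      else o

def find_first_stop_string_py (text : String) (stop_sequences : List String) : Option (Int × String) :=
  match (stop_sequences.map String.toList).foldl (pvStepA text.toList) none with
  | none => none
  | some (i, s) => some (i, String.ofList s)

-- ===== PORT B =====
-- inner loop of Source B: best candidate starting at position with suffix d = text[i:]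
-- (text.startswith(s, i) is ported as s.isPrefixOf (text[i:]); exact for 0 ≤ i and s ≠ "")
def pvStepB (d : List Char) (best : Option (List Char)) (s : List Char) : Option (List Char) :=
  if s.isPrefixOf d && (match best with | none => true | some c => decide (c.length < s.length))
  then some s else best

def pvBestAt (pats : List (List Char)) (d : List Char) : Option (List Char) :=
  pats.foldl (pvStepB d) none

-- outer loop `for i in range(len(text)) … return (i, best)` = findSome? over the range
def find_first_stop_string_py_alt (text : String) (stop_sequences : List String) : Option (Int × String) :=
  -- patterns = [s for s in stop_sequences if s]; then scan i = 0, 1, … over text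
  (List.range text.toList.length).findSome?
    (fun i => (pvBestAt ((stop_sequences.map String.toList).filter (fun s => s ≠ []))
      (text.toList.drop i)).map (fun b => ((i : Int), String.ofList b)))

-- ===== PRECONDITION & SPEC =====
def Spec_find_first_stop_string_py (text : String) (stop_sequences : List String) (out : Option (Int × String)) : Prop := out = find_first_stop_string_py_alt text stop_sequences
instance (text : String) (stop_sequences : List String) (out : Option (Int × String)) : Decidable (Spec_find_first_stop_string_py text stop_sequences out) := by unfold Spec_find_first_stop_string_py; infer_instance

-- ===== CLAIM (what is proved, stated in full; the proofs are below) =====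
def Claim_equal_find_first_stop_string_py : Prop := ∀ (text : String) (stop_sequences : List String), Dom_find_first_stop_string_py text stop_sequences → Spec_find_first_stop_string_py text stop_sequences (find_first_stop_string_py text stop_sequences)

-- ===== LEMMAS AND PROOFS =====

-- small rewrite lemmas for A's loop step
theorem pvStepA_skip (t : List Char) (o : Option (Int × List Char)) (s : List Char)
    (hf : PySem.Chars.find t s < 0) : pvStepA t o s = o := by
  by_cases hne : s = [] <;> simp [pvStepA, hne, hf]

theorem pvStepA_none (t : List Char) (s : List Char) (hne : s ≠ [])
    (hf : ¬ PySem.Chars.find t s < 0) : pvStepA t none s = some (PySem.Chars.find t s, s) := by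
  simp [pvStepA, hne, hf]

theorem pvStepA_replace (t : List Char) (s bs : List Char) (bi : Int) (hne : s ≠ [])
    (hf : ¬ PySem.Chars.find t s < 0)
    (hc : PySem.Chars.find t s < bi ∨ (PySem.Chars.find t s = bi ∧ bs.length < s.length)) :
    pvStepA t (some (bi, bs)) s = some (PySem.Chars.find t s, s) := by
  simp only [pvStepA, if_neg hne, if_neg hf]
  rw [if_pos hc]

theorem pvStepA_keep (t : List Char) (s bs : List Char) (bi : Int) (hne : s ≠ [])
    (hf : ¬ PySem.Chars.find t s < 0)
    (hc : ¬ (PySem.Chars.find t s < bi ∨ (PySem.Chars.find t s = bi ∧ bs.length < s.length))) :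
    pvStepA t (some (bi, bs)) s = some (bi, bs) := by
  simp only [pvStepA, if_neg hne, if_neg hf]
  rw [if_neg hc]

-- small rewrite lemmas for B's inner-loop step
theorem pvStepB_no (d : List Char) (b : Option (List Char)) (s : List Char)
    (hp : ¬ s <+: d) : pvStepB d b s = b := by
  have : s.isPrefixOf d = false := by
    by_contra hc
    exact hp (List.isPrefixOf_iff_prefix.mp (by simpa using hc))
  simp [pvStepB, this]

theorem pvStepB_none (d : List Char) (s : List Char) (hp : s <+: d) :
    pvStepB d none s = some s := by
  simp [pvStepB, List.isPrefixOf_iff_prefix.mpr hp]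

theorem pvStepB_longer (d : List Char) (s c : List Char) (hp : s <+: d)
    (hl : c.length < s.length) : pvStepB d (some c) s = some s := by
  simp [pvStepB, List.isPrefixOf_iff_prefix.mpr hp, hl]

theorem pvStepB_shorter (d : List Char) (s c : List Char) (hl : ¬ c.length < s.length) :
    pvStepB d (some c) s = some c := by
  by_cases hp : s.isPrefixOf d <;> simp [pvStepB, hp, hl]

-- a fold whose step fixes every element of the list is the identity
theorem pv_foldl_id {α β : Type} (f : β → α → β) (l : List α) (o : β)
    (h : ∀ s ∈ l, ∀ x, f x s = x) : l.foldl f o = o := by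
  induction l generalizing o with
  | nil => rfl
  | cons a l ih =>
    rw [List.foldl_cons, h a (by simp) o]
    exact ih o (fun s hs x => h s (by simp [hs]) x)

-- findSome? of a pointwise-mapped function is the map of findSome?
theorem pv_findSome?_map {α β γ : Type} (l : List α) (g : α → Option β) (m : β → γ) :
    l.findSome? (fun x => (g x).map m) = (l.findSome? g).map m := by
  induction l with
  | nil => rfl
  | cons a l ih =>
    cases h : g a <;> simp [h, ih]

-- the invariant tying A's loop state to B's inner-loop state at the minimal position i₀
def pvR (i₀ : Nat) (o : Option (Int × List Char)) (b : Option (List Char)) : Prop :=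
  (b = none ∧ (o = none ∨ ∃ bi bs, o = some (bi, bs) ∧ (i₀ : Int) < bi)) ∨
  (∃ c, b = some c ∧ o = some ((i₀ : Int), c))

theorem pvR_step (t : List Char) (i₀ : Nat) (s : List Char)
    (hne : s ≠ [])
    (hge : PySem.Chars.find t s = -1 ∨ (i₀ : Int) ≤ PySem.Chars.find t s)
    (hiff : s <+: t.drop i₀ ↔ PySem.Chars.find t s = (i₀ : Int))
    (o : Option (Int × List Char)) (b : Option (List Char)) (h : pvR i₀ o b) :
    pvR i₀ (pvStepA t o s) (pvStepB (t.drop i₀) b s) := by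
  by_cases hp : s <+: t.drop i₀
  · -- s matches at i₀, so find t s = i₀
    have hf : PySem.Chars.find t s = (i₀ : Int) := hiff.mp hp
    have hnn : ¬ PySem.Chars.find t s < 0 := by omega
    rcases h with ⟨hb, ho⟩ | ⟨c, hb, ho⟩
    · subst hb
      rw [pvStepB_none _ _ hp]
      rcases ho with ho | ⟨bi, bs, ho, hlt⟩
      · subst ho
        rw [pvStepA_none t s hne hnn]
        exact Or.inr ⟨s, rfl, by rw [hf]⟩
      · subst ho
        rw [pvStepA_replace t s bs bi hne hnn (Or.inl (by omega))]
        exact Or.inr ⟨s, rfl, by rw [hf]⟩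
    · subst hb; subst ho
      by_cases hlen : c.length < s.length
      · rw [pvStepB_longer _ _ _ hp hlen, pvStepA_replace t s c (i₀ : Int) hne hnn
          (Or.inr ⟨hf, hlen⟩)]
        exact Or.inr ⟨s, rfl, by rw [hf]⟩
      · rw [pvStepB_shorter _ _ _ hlen, pvStepA_keep t s c (i₀ : Int) hne hnn (by omega)]
        exact Or.inr ⟨c, rfl, rfl⟩
  · -- s does not match at i₀: find t s = -1 or > i₀
    rw [pvStepB_no _ _ _ hp]
    rcases hge with hf | hf
    · rw [pvStepA_skip t o s (by omega)]
      exact h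
    · have hgt : (i₀ : Int) < PySem.Chars.find t s := by
        rcases lt_or_eq_of_le hf with h' | h'
        · exact h'
        · exact absurd (hiff.mpr h'.symm) hp
      have hnn : ¬ PySem.Chars.find t s < 0 := by omega
      rcases h with ⟨hb, ho⟩ | ⟨c, hb, ho⟩
      · subst hb
        rcases ho with ho | ⟨bi, bs, ho, hlt⟩
        · subst ho
          rw [pvStepA_none t s hne hnn]
          exact Or.inl ⟨rfl, Or.inr ⟨_, _, rfl, hgt⟩⟩
        · subst ho
          by_cases hrep : PySem.Chars.find t s < bi ∨
              (PySem.Chars.find t s = bi ∧ bs.length < s.length)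
          · rw [pvStepA_replace t s bs bi hne hnn hrep]
            exact Or.inl ⟨rfl, Or.inr ⟨_, _, rfl, hgt⟩⟩
          · rw [pvStepA_keep t s bs bi hne hnn hrep]
            exact Or.inl ⟨rfl, Or.inr ⟨_, _, rfl, hlt⟩⟩
      · subst hb; subst ho
        rw [pvStepA_keep t s c (i₀ : Int) hne hnn (by omega)]
        exact Or.inr ⟨c, rfl, rfl⟩

theorem pvR_foldl (t : List Char) (i₀ : Nat) (ps : List (List Char))
    (h : ∀ s ∈ ps, s ≠ [] ∧
      (PySem.Chars.find t s = -1 ∨ (i₀ : Int) ≤ PySem.Chars.find t s) ∧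
      (s <+: t.drop i₀ ↔ PySem.Chars.find t s = (i₀ : Int)))
    (o : Option (Int × List Char)) (b : Option (List Char)) (hR : pvR i₀ o b) :
    pvR i₀ (ps.foldl (pvStepA t) o) (ps.foldl (pvStepB (t.drop i₀)) b) := by
  induction ps generalizing o b with
  | nil => exact hR
  | cons a ps ih =>
    obtain ⟨h1, h2, h3⟩ := h a (by simp)
    exact ih (fun s hs => h s (by simp [hs])) _ _ (pvR_step t i₀ a h1 h2 h3 o b hR)

-- if no pattern matches at the head of d, B's inner loop yields none
theorem pvBestAt_eq_none (pats : List (List Char)) (d : List Char)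
    (h : ∀ s ∈ pats, ¬ s <+: d) : pvBestAt pats d = none := by
  unfold pvBestAt
  exact pv_foldl_id _ _ _ (fun s hs x => pvStepB_no d x s (h s hs))

theorem pvBestAt_ne_none (pats : List (List Char)) (d : List Char)
    (h : ∃ s ∈ pats, s <+: d) : pvBestAt pats d ≠ none := by
  unfold pvBestAt
  obtain ⟨s, hs, hp⟩ := h
  obtain ⟨l1, l2, rfl⟩ := List.append_of_mem hs
  rw [List.foldl_append]
  have hstep : ∃ c, pvStepB d (l1.foldl (pvStepB d) none) s = some c := by
    cases l1.foldl (pvStepB d) none with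
    | none => exact ⟨s, pvStepB_none d s hp⟩
    | some c =>
      by_cases hl : c.length < s.length
      · exact ⟨s, pvStepB_longer d s c hp hl⟩
      · exact ⟨c, pvStepB_shorter d s c hl⟩
  have hsome : ∀ (b : Option (List Char)) (l : List (List Char)), b ≠ none →
      l.foldl (pvStepB d) b ≠ none := by
    intro b l
    induction l generalizing b with
    | nil => exact fun h => h
    | cons a l ih =>
      intro hb
      apply ih
      cases b with
      | none => exact absurd rfl hb
      | some c =>
        unfold pvStepB
        split <;> split <;> simp_all
  obtain ⟨c, hc⟩ := hstep
  rw [List.foldl_cons, hc]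
  exact hsome _ _ (by simp)

-- the chars-level heart of the equivalence: A's pattern-major fold equals B's position scan
theorem pv_main (t : List Char) (pats : List (List Char)) (hne : ∀ s ∈ pats, s ≠ []) :
    pats.foldl (pvStepA t) none =
    (List.range t.length).findSome?
      (fun i => (pvBestAt pats (t.drop i)).map (fun b => ((i : Int), b))) := by
  by_cases hex : ∃ i, ∃ s ∈ pats, s <+: t.drop i
  · -- some pattern occurs; i₀ = the least matching position
    set i₀ := Nat.find hex with hi₀
    obtain ⟨s₀, hs₀, hp₀⟩ := Nat.find_spec hex
    have hmin : ∀ j < i₀, ¬ ∃ s ∈ pats, s <+: t.drop j := fun j hj => Nat.find_min hex hj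
    -- every pattern in pats: find = -1 or ≥ i₀, and matches-at-i₀ ↔ find = i₀
    have hfacts : ∀ s ∈ pats, s ≠ [] ∧
        (PySem.Chars.find t s = -1 ∨ (i₀ : Int) ≤ PySem.Chars.find t s) ∧
        (s <+: t.drop i₀ ↔ PySem.Chars.find t s = (i₀ : Int)) := by
      intro s hs
      refine ⟨hne s hs, ?_, ?_⟩
      · by_cases hin : s <:+: t
        · right
          have hpos : 0 ≤ PySem.Chars.find t s := (PySem.Chars.find_nonneg_iff t s).mpr hin
          obtain ⟨hpre, -⟩ := PySem.Chars.find_spec hpos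
          have : i₀ ≤ (PySem.Chars.find t s).toNat := by
            by_contra hc
            exact hmin _ (by omega) ⟨s, hs, hpre⟩
          omega
        · exact Or.inl ((PySem.Chars.find_eq_neg_one_iff t s).mpr hin)
      · constructor
        · intro hp
          have hin : s <:+: t := (PySem.Chars.isIn_iff_infix s t).mp
            ((PySem.Chars.exists_prefix_drop_iff_isIn s t).mp ⟨i₀, hp⟩)
          have hpos : 0 ≤ PySem.Chars.find t s := (PySem.Chars.find_nonneg_iff t s).mpr hin
          obtain ⟨hpre, hminf⟩ := PySem.Chars.find_spec hpos
          have h1 : i₀ ≤ (PySem.Chars.find t s).toNat := by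
            by_contra hc
            exact hmin _ (by omega) ⟨s, hs, hpre⟩
          have h2 : ¬ i₀ < (PySem.Chars.find t s).toNat := fun hc => hminf i₀ hc hp
          omega
        · intro hf
          have hpos : 0 ≤ PySem.Chars.find t s := by omega
          have hpre := (PySem.Chars.find_spec hpos).1
          rw [hf] at hpre
          simpa using hpre
    -- i₀ < t.length (patterns are nonempty)
    have hi₀lt : i₀ < t.length := by
      have hlen : s₀.length ≤ (t.drop i₀).length := hp₀.length_le
      have hdl : (t.drop i₀).length = t.length - i₀ := by simp
      have hne₀ : s₀.length ≠ 0 := by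
        simpa using (fun h => hne s₀ hs₀ (List.eq_nil_of_length_eq_zero h))
      omega
    -- split the range at i₀; B finds nothing before i₀ and something at i₀
    have hrange : List.range t.length =
        List.range i₀ ++ (List.range (t.length - i₀)).map (i₀ + ·) := by
      rw [← List.range_add]
      congr 1
      omega
    rw [hrange, List.findSome?_append]
    have hfirst : (List.range i₀).findSome?
        (fun i => (pvBestAt pats (t.drop i)).map (fun b => ((i : Int), b))) = none := by
      rw [List.findSome?_eq_none_iff]
      intro i hi
      rw [pvBestAt_eq_none pats (t.drop i)
        (fun s hs hp => hmin i (List.mem_range.mp hi) ⟨s, hs, hp⟩)]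
      rfl
    rw [hfirst, Option.none_or]
    obtain ⟨k, hk⟩ : ∃ k, t.length - i₀ = k + 1 := ⟨t.length - i₀ - 1, by omega⟩
    rw [hk, List.range_succ_eq_map]
    simp only [List.map_cons, List.findSome?_cons, Nat.add_zero]
    -- at i₀ the inner loop yields some c, and A's fold equals some (i₀, c) by the invariant
    obtain ⟨c, hc⟩ := Option.ne_none_iff_exists'.mp
      (pvBestAt_ne_none pats (t.drop i₀) ⟨s₀, hs₀, hp₀⟩)
    have hR := pvR_foldl t i₀ pats hfacts none none (Or.inl ⟨rfl, Or.inl rfl⟩)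
    have hBfold : pats.foldl (pvStepB (t.drop i₀)) none = some c := hc
    rcases hR with ⟨hb, -⟩ | ⟨c', hb, ho⟩
    · rw [hBfold] at hb
      exact absurd hb (by simp)
    · rw [hBfold] at hb
      have hcc : c' = c := by injection hb with h; exact h.symm
      rw [ho, hcc, hc]
      rfl
  · -- no pattern occurs anywhere: both sides are none
    push Not at hex
    have hA : pats.foldl (pvStepA t) none = none := by
      apply pv_foldl_id
      intro s hs x
      have hin : ¬ s <:+: t := by
        intro hin
        obtain ⟨j, hj⟩ := (PySem.Chars.exists_prefix_drop_iff_isIn s t).mpr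
          ((PySem.Chars.isIn_iff_infix s t).mpr hin)
        exact hex j s hs hj
      exact pvStepA_skip t x s (by
        rw [(PySem.Chars.find_eq_neg_one_iff t s).mpr hin]; omega)
    rw [hA, List.findSome?_eq_none_iff.mpr]
    intro i _
    rw [pvBestAt_eq_none pats (t.drop i) (fun s hs hp => hex i s hs hp)]
    rfl

-- A's fold skips empty patterns, so it equals the fold over the filtered list
theorem pv_foldl_filter_ne_nil (t : List Char) (l : List (List Char))
    (o : Option (Int × List Char)) :
    l.foldl (pvStepA t) o = (l.filter (fun s => s ≠ [])).foldl (pvStepA t) o := by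
  induction l generalizing o with
  | nil => rfl
  | cons a l ih =>
    by_cases h : a = []
    · rw [List.foldl_cons, show pvStepA t o a = o from by simp [pvStepA, h]]
      simpa [List.filter_cons, h] using ih o
    · rw [List.filter_cons, if_pos (by simp [h]), List.foldl_cons, List.foldl_cons]
      exact ih _

-- ===== VERDICT (by name: the statement is the Claim_ definition above) =====
theorem find_first_stop_string_py_spec : Claim_equal_find_first_stop_string_py := by
  intro text stop_sequences _
  unfold Spec_find_first_stop_string_py find_first_stop_string_py find_first_stop_string_py_alt
  rw [pv_foldl_filter_ne_nil _ _ none]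
  rw [pv_main text.toList ((stop_sequences.map String.toList).filter (fun s => s ≠ []))
    (by intro s hs; exact of_decide_eq_true (List.mem_filter.mp hs).2)]
  rw [show (fun i => (pvBestAt ((stop_sequences.map String.toList).filter (fun s => s ≠ []))
      (text.toList.drop i)).map (fun b => ((i : Int), String.ofList b))) =
      (fun i => ((pvBestAt ((stop_sequences.map String.toList).filter (fun s => s ≠ []))
      (text.toList.drop i)).map (fun b => ((i : Int), b))).map
      (fun p => (p.1, String.ofList p.2))) from by funext i; cases pvBestAt _ _ <;> rfl]
  rw [pv_findSome?_map]
  cases (List.range text.toList.length).findSome?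
      (fun i => (pvBestAt ((stop_sequences.map String.toList).filter (fun s => s ≠ []))
      (text.toList.drop i)).map (fun b => ((i : Int), b))) with
  | none => rfl
  | some p => rfl
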